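-- pv_equiv track=rewrite | github.com/VaninaBlas/Guias | Practicas td1/star_wars/star_wars.py | nave_estelar_cercana
-- ===== SOURCE A (Python) =====
-- def nave_estelar_cercana(sensado: list[int], p: int) -> bool:
--     """
--     Requiere: p>=0
--     Devuelve:  si existe alguna nave estelar a una proximidad menor o igual al
-- punto crıtico
--     """
--     # EJ 1: COMPLETAR
--     i:int=0
--     vr:bool=False
--     while (i<len(sensado)):
--         if(sensado[i]<=p):
--             vr=True
--             i=len(sensado)
--         i=i+1
--     return vr
-- ===== SOURCE B (Python) =====
-- def nave_estelar_cercana(sensado: list[int], p: int) -> bool: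
--     if not sensado:
--         return False
--     m = sensado[0]
--     for x in sensado[1:]:
--         if x < m:
--             m = x
--     return m <= p
-- ===== Notes on version B (the rewrite author's own statement) =====
-- stated objective: alternative
-- what changed: B computes the global minimum with a running-minimum reduction (guarding the empty list) and compares it to p once, instead of A's indexed while-loop with a boolean flag and an early-exit index trick.
import Mathlib
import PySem

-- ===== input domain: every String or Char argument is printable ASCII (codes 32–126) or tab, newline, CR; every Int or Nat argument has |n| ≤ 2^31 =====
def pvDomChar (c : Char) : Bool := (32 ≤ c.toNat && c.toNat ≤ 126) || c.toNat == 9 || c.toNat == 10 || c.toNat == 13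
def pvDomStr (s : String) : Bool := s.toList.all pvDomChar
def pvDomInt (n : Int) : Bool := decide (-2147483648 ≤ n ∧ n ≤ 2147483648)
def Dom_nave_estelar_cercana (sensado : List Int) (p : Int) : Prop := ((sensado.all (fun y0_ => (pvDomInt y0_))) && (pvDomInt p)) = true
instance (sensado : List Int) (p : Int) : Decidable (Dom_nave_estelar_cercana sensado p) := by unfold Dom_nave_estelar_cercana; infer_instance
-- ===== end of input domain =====

-- B scans for the minimum and compares it to p once, instead of A's flag-and-early-exit while loop; same O(n) cost.

-- ===== PORT A =====
-- A's while loop: scan from index i, set vr and jump past the end on the first element ≤ p.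
-- Early exit is modelled by returning true immediately, as the loop does no further work after it.
def naveLoopA (sensado : List Int) (p : Int) : Bool :=
  match sensado with
  | [] => false
  | x :: xs => if x ≤ p then true else naveLoopA xs p

def nave_estelar_cercana (sensado : List Int) (p : Int) : Bool :=
  naveLoopA sensado p

-- ===== PORT B =====
def nave_estelar_cercana_alt (sensado : List Int) (p : Int) : Bool :=
  match sensado with
  | [] => false
  | x :: xs => decide (xs.foldl (fun m y => if y < m then y else m) x ≤ p)

-- ===== PRECONDITION & SPEC =====
def Spec_nave_estelar_cercana (sensado : List Int) (p : Int) (out : Bool) : Prop := out = nave_estelar_cercana_alt sensado p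
instance (sensado : List Int) (p : Int) (out : Bool) : Decidable (Spec_nave_estelar_cercana sensado p out) := by unfold Spec_nave_estelar_cercana; infer_instance

-- ===== CLAIM (what is proved, stated in full; the proofs are below) =====
def Claim_equal_nave_estelar_cercana : Prop := ∀ (sensado : List Int) (p : Int), Dom_nave_estelar_cercana sensado p → Spec_nave_estelar_cercana sensado p (nave_estelar_cercana sensado p)

-- ===== LEMMAS AND PROOFS =====

-- the running minimum is ≤ p iff the seed is or some element is
theorem foldl_min_le_iff (xs : List Int) (x p : Int) :
    (xs.foldl (fun m y => if y < m then y else m) x ≤ p) ↔ (x ≤ p ∨ ∃ a ∈ xs, a ≤ p) := by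
  induction xs generalizing x with
  | nil => simp
  | cons y ys ih =>
    simp only [List.foldl_cons, ih, List.mem_cons]
    constructor
    · rintro (h | ⟨a, ha, hap⟩)
      · split at h
        · exact Or.inr ⟨y, Or.inl rfl, h⟩
        · exact Or.inl h
      · exact Or.inr ⟨a, Or.inr ha, hap⟩
    · rintro (h | ⟨a, ha | ha, hap⟩)
      · left; split <;> omega
      · subst ha; left; split <;> omega
      · exact Or.inr ⟨a, ha, hap⟩

theorem loopA_exists (sensado : List Int) (p : Int) :
    naveLoopA sensado p = decide (∃ a ∈ sensado, a ≤ p) := by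
  induction sensado with
  | nil => simp [naveLoopA]
  | cons x xs ih =>
    simp only [naveLoopA, ih]
    by_cases h : x ≤ p <;> simp [h]

-- ===== VERDICT (by name: the statement is the Claim_ definition above) =====
theorem nave_estelar_cercana_spec : Claim_equal_nave_estelar_cercana := by
  intro sensado p _
  unfold Spec_nave_estelar_cercana nave_estelar_cercana nave_estelar_cercana_alt
  cases sensado with
  | nil => simp [naveLoopA]
  | cons x xs =>
    rw [loopA_exists]
    simp [foldl_min_le_iff, List.mem_cons]
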